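-- pv_equiv track=rewrite | github.com/Cara-Framework/core | cara/commands/core/ListCommandsCommand.py | _categorize_commands
-- ===== SOURCE A (Python) =====
-- from collections import defaultdict
-- from typing import Any, Dict, List
--
-- def _categorize_commands(
--     commands: List[Dict[str, Any]]
-- ) -> Dict[str, List[Dict[str, Any]]]:
--     """Categorize commands by their namespace/prefix."""
--     categories = defaultdict(list)
--
--     for cmd in commands:
--         name = cmd["name"]
--         if ":" in name:
--             category = name.split(":")[0]
--         else:
--             category = "general"
--
--         categories[category].append(cmd)
--
--     # Sort commands within each category
--     for category in categories:
--         categories[category].sort(key=lambda x: x["name"])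
--
--     return dict(categories)
-- ===== SOURCE B (Python) =====
-- def _categorize_commands(commands):
--     """Categorize commands by their namespace/prefix."""
--     def category(cmd):
--         name = cmd["name"]
--         return name.split(":")[0] if ":" in name else "general"
--
--     ordered = sorted(commands, key=lambda x: x["name"])
--     cats = list(dict.fromkeys(category(cmd) for cmd in commands))
--     return {c: [cmd for cmd in ordered if category(cmd) == c] for c in cats}
-- ===== Notes on version B (the rewrite author's own statement) =====
-- stated objective: alternative
-- what changed: Instead of grouping into a defaultdict and then sorting every group separately, B sorts the whole list once by name (stable), lists the categories in first-appearance order via dict.fromkeys, and builds each group by filtering the pre-sorted list, so the per-group sort phase disappears.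
import Mathlib
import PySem

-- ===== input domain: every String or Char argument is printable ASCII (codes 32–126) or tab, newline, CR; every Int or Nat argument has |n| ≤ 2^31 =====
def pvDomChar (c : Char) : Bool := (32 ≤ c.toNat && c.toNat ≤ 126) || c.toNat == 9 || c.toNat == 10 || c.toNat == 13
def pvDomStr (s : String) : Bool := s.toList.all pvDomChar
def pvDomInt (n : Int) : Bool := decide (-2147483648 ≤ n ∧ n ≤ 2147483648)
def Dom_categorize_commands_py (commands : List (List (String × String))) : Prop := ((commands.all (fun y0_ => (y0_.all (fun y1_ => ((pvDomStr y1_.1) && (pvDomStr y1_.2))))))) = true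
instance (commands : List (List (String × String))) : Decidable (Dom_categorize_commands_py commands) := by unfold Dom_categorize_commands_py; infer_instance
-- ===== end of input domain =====

-- B replaces A's group-then-sort-each-group with one stable global sort by name, the
-- category list in first-appearance order, and a filter of the pre-sorted list per category
-- (objective: alternative decomposition, same results).

-- ===== PORT A =====
def categorize_commands_py (commands : List (List (String × String))) : List (String × List (List (String × String))) :=
  -- categories = defaultdict(list); for cmd in commands: ... categories[category].append(cmd)
  let categories := commands.foldl (fun d cmd =>
      let name := (cmd.lookup "name").getD ""   -- cmd["name"]; the KeyError case is excluded by Pre_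
      let category := if PySem.Str.isIn ":" name then
          PySem.List.pyGetD ((PySem.Str.split? name ":").getD []) 0 ""   -- name.split(":")[0]; sep ":" ≠ "" so split? = some, result nonempty
        else "general"
      d.modify category [] (fun l => l ++ [cmd]))
    (PySem.Dict.empty : PySem.Dict String (List (List (String × String))))
  -- for category in categories: categories[category].sort(key=lambda x: x["name"])  (keys unchanged, each value replaced in place)
  (PySem.Dict.mk (categories.items.map (fun p =>
      (p.1, PySem.List.sorted p.2 (fun x => (x.lookup "name").getD "") false)))).items

-- ===== PORT B =====
def categorize_commands_py_alt (commands : List (List (String × String))) : List (String × List (List (String × String))) :=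
  -- def category(cmd): ...
  let category := fun (cmd : List (String × String)) =>
    let name := (cmd.lookup "name").getD ""   -- cmd["name"]; the KeyError case is excluded by Pre_
    if PySem.Str.isIn ":" name then
      PySem.List.pyGetD ((PySem.Str.split? name ":").getD []) 0 ""
    else "general"
  -- ordered = sorted(commands, key=lambda x: x["name"])
  let ordered := PySem.List.sorted commands (fun x => (x.lookup "name").getD "") false
  -- cats = list(dict.fromkeys(category(cmd) for cmd in commands))
  let cats := PySem.List.dedup (commands.map category)
  -- {c: [cmd for cmd in ordered if category(cmd) == c] for c in cats}
  cats.map (fun c => (c, ordered.filter (fun cmd => category cmd == c)))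

-- ===== PRECONDITION & SPEC =====
-- Pre_ excludes exactly the inputs where some command dict has no "name" key: there the Python A
-- (and B) raises KeyError.
def Pre_categorize_commands_py (commands : List (List (String × String))) : Prop :=
  (commands.all (fun cmd => cmd.any (fun p => p.1 == "name"))) = true
instance (commands : List (List (String × String))) : Decidable (Pre_categorize_commands_py commands) := by unfold Pre_categorize_commands_py; infer_instance

def pvWitness_categorize_commands_py : (List (List (String × String))) :=
  [[("name", "db:migrate")], [("name", "help")], [("name", "db:seed")]]

def Spec_categorize_commands_py (commands : List (List (String × String))) (out : List (String × List (List (String × String)))) : Prop := out = categorize_commands_py_alt commands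
instance (commands : List (List (String × String))) (out : List (String × List (List (String × String)))) : Decidable (Spec_categorize_commands_py commands out) := by unfold Spec_categorize_commands_py; infer_instance

-- ===== CLAIM (what is proved, stated in full; the proofs are below) =====
def Claim_equal_categorize_commands_py : Prop := ∀ (commands : List (List (String × String))), Dom_categorize_commands_py commands → Pre_categorize_commands_py commands → Spec_categorize_commands_py commands (categorize_commands_py commands)

-- ===== LEMMAS AND PROOFS =====

-- insertBy (strict-key) keeps the accumulator sorted (≤ on keys)
theorem pv_pairwise_insertBy {α κ : Type} [LinearOrder κ] (key : α → κ) (x : α) (ys : List α)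
    (h : ys.Pairwise (fun a b => key a ≤ key b)) :
    (PySem.List.insertBy (fun a b => decide (key a < key b)) x ys).Pairwise (fun a b => key a ≤ key b) := by
  induction ys with
  | nil => simp [PySem.List.insertBy]
  | cons y ys ih =>
    rw [List.pairwise_cons] at h
    by_cases hb : key x < key y
    · simp only [PySem.List.insertBy, hb, decide_true, if_pos]
      refine List.Pairwise.cons ?_ (List.pairwise_cons.mpr h)
      intro z hz
      rcases List.mem_cons.mp hz with rfl | hz
      · exact le_of_lt hb
      · exact le_of_lt (lt_of_lt_of_le hb (h.1 z hz))
    · simp only [PySem.List.insertBy, hb, decide_false, if_neg, Bool.false_eq_true,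
        not_false_eq_true]
      refine List.Pairwise.cons ?_ (ih h.2)
      intro z hz
      rcases (PySem.List.mem_insertBy _ _ _ _).mp hz with rfl | hz
      · exact le_of_not_gt hb
      · exact h.1 z hz

-- if x goes before every element of l, insertBy puts it in front
theorem pv_insertBy_front {α : Type} (b : α → α → Bool) (x : α) (l : List α)
    (h : ∀ z ∈ l, b x z = true) :
    PySem.List.insertBy b x l = x :: l := by
  cases l with
  | nil => simp [PySem.List.insertBy]
  | cons z l => simp [PySem.List.insertBy, h z (List.mem_cons_self)]

-- filtering commutes with inserting into a sorted accumulator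
theorem pv_filter_insertBy {α κ : Type} [LinearOrder κ] (key : α → κ) (p : α → Bool) (x : α)
    (ys : List α) (h : ys.Pairwise (fun a b => key a ≤ key b)) :
    (PySem.List.insertBy (fun a b => decide (key a < key b)) x ys).filter p
      = if p x then PySem.List.insertBy (fun a b => decide (key a < key b)) x (ys.filter p)
        else ys.filter p := by
  induction ys with
  | nil => by_cases hp : p x <;> simp [PySem.List.insertBy, hp]
  | cons y ys ih =>
    rw [List.pairwise_cons] at h
    by_cases hb : key x < key y
    · simp only [PySem.List.insertBy, hb, decide_true, if_pos]
      by_cases hp : p x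
      · by_cases hy : p y
        · rw [List.filter_cons_of_pos hp, List.filter_cons_of_pos hy, if_pos hp,
            pv_insertBy_front _ x (y :: List.filter p ys) ?_]
          intro z hz
          rcases List.mem_cons.mp hz with rfl | hz
          · simpa using hb
          · have := h.1 z (List.mem_of_mem_filter hz)
            simpa using lt_of_lt_of_le hb this
        · rw [List.filter_cons_of_pos hp, List.filter_cons_of_neg hy, if_pos hp,
            pv_insertBy_front _ x (List.filter p ys) ?_]
          intro z hz
          have := h.1 z (List.mem_of_mem_filter hz)
          simpa using lt_of_lt_of_le hb this
      · rw [List.filter_cons_of_neg hp, if_neg hp]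
    · simp only [PySem.List.insertBy, hb, decide_false, Bool.false_eq_true, if_neg,
        not_false_eq_true]
      by_cases hy : p y
      · rw [List.filter_cons_of_pos hy, ih h.2]
        by_cases hp : p x
        · rw [if_pos hp, if_pos hp, List.filter_cons_of_pos hy]
          simp [PySem.List.insertBy, hb]
        · rw [if_neg hp, if_neg hp, List.filter_cons_of_pos hy]
      · rw [List.filter_cons_of_neg hy, ih h.2]
        by_cases hp : p x
        · rw [if_pos hp, if_pos hp, List.filter_cons_of_neg hy]
        · rw [if_neg hp, if_neg hp, List.filter_cons_of_neg hy]

-- filtering commutes with the whole insertion-sort fold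
theorem pv_filter_foldl_insertBy {α κ : Type} [LinearOrder κ] (key : α → κ) (p : α → Bool) :
    ∀ (xs acc : List α), acc.Pairwise (fun a b => key a ≤ key b) →
    (xs.foldl (fun acc x => PySem.List.insertBy (fun a b => decide (key a < key b)) x acc) acc).filter p
      = (xs.filter p).foldl (fun acc x => PySem.List.insertBy (fun a b => decide (key a < key b)) x acc)
          (acc.filter p) := by
  intro xs
  induction xs with
  | nil => intro acc _; simp
  | cons x xs ih =>
    intro acc hacc
    rw [List.foldl_cons, ih _ (pv_pairwise_insertBy key x acc hacc),
      pv_filter_insertBy key p x acc hacc]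
    by_cases hp : p x
    · rw [if_pos hp, List.filter_cons_of_pos hp, List.foldl_cons]
    · rw [if_neg hp, List.filter_cons_of_neg hp]

-- stability: filtering a sorted list = sorting the filtered list
theorem pv_filter_sorted {α κ : Type} [LinearOrder κ] (key : α → κ) (p : α → Bool) (xs : List α) :
    (PySem.List.sorted xs key false).filter p = PySem.List.sorted (xs.filter p) key false := by
  rw [PySem.List.sorted_eq_foldl_insertBy, PySem.List.sorted_eq_foldl_insertBy]
  simpa using pv_filter_foldl_insertBy key p xs [] (List.Pairwise.nil)

-- A's grouping fold, characterised: keys in first-appearance order, each group a filter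
theorem pv_grouping_items {α κ : Type} [BEq κ] [LawfulBEq κ] (cat : α → κ) (xs : List α) :
    (xs.foldl (fun d x => d.modify (cat x) [] (fun l => l ++ [x]))
        (PySem.Dict.empty : PySem.Dict κ (List α))).items
      = (PySem.List.dedup (xs.map cat)).map (fun c => (c, xs.filter (fun x => cat x == c))) := by
  have hk : (xs.foldl (fun d x => d.modify (cat x) [] (fun l => l ++ [x]))
      (PySem.Dict.empty : PySem.Dict κ (List α))).keys = PySem.List.dedup (xs.map cat) := by
    have h := PySem.Dict.keys_foldl_modify_key xs cat [] (fun _ x l => l ++ [x])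
      (PySem.Dict.empty : PySem.Dict κ (List α))
    have h2 : PySem.Set.update ([] : List κ) (xs.map cat) = PySem.List.dedup (xs.map cat) := by
      simp [pysem, ← List.foldl_map]
      rfl
    have h3 : (PySem.Dict.empty : PySem.Dict κ (List α)).keys = ([] : List κ) := rfl
    rw [h3, h2] at h
    simpa using h
  have hnd : (xs.foldl (fun d x => d.modify (cat x) [] (fun l => l ++ [x]))
      (PySem.Dict.empty : PySem.Dict κ (List α))).keys.Nodup := by
    exact PySem.Dict.nodup_keys_foldl_modify_key xs cat [] (fun _ x l => l ++ [x])
      (PySem.Dict.empty : PySem.Dict κ (List α)) List.nodup_nil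
  have hg : ∀ c, (xs.foldl (fun d x => d.modify (cat x) [] (fun l => l ++ [x]))
      (PySem.Dict.empty : PySem.Dict κ (List α))).getD c []
        = xs.filter (fun x => cat x == c) := by
    intro c
    have h1 : xs.foldl (fun d x => d.modify (cat x) [] (fun l => l ++ [x]))
        (PySem.Dict.empty : PySem.Dict κ (List α))
        = (xs.map (fun x => (cat x, x))).foldl
            (fun d p => d.modify p.1 [] (fun l => l ++ [p.2]))
            (PySem.Dict.empty : PySem.Dict κ (List α)) := by
      rw [List.foldl_map]
    rw [h1, PySem.Dict.getD_foldl_modify_append]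
    simp [List.filter_map, Function.comp_def]
  rw [PySem.Dict.items_eq_map_keys _ hnd [], hk]
  exact List.map_congr_left (fun c _ => by rw [hg c])

-- ===== VERDICT (by name: the statement is the Claim_ definition above) =====
theorem categorize_commands_py_spec : Claim_equal_categorize_commands_py := by
  intro commands _hdom _hpre
  show categorize_commands_py commands = categorize_commands_py_alt commands
  simp only [categorize_commands_py, categorize_commands_py_alt]
  rw [pv_grouping_items
    (fun (cmd : List (String × String)) =>
      if PySem.Str.isIn ":" ((cmd.lookup "name").getD "") then
        PySem.List.pyGetD ((PySem.Str.split? ((cmd.lookup "name").getD "") ":").getD []) 0 ""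
      else "general") commands]
  show (PySem.Dict.mk _).items = _
  simp only [List.map_map]
  refine List.map_congr_left (fun c _ => ?_)
  simp only [Function.comp_def]
  rw [pv_filter_sorted]
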